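-- pv_equiv track=rewrite | github.com/TrMaksim/course_python_pro | lessons_3/utils.py | validate_input_bank
-- ===== SOURCE A (Python) =====
-- def validate_input_bank(bank: str) -> str | None:
--     formats = {
--         'NBU': {'nbu', 'NB', 'NationalBank', 'nationalbank', 'Nb', 'NBU'},
--         'PB': {'pb', 'Pb', 'privatbank', 'PrivatBank', 'pB', 'PRIVATBANK', 'PB'},
--     }
--
--     for bank_name, bank_formats in formats.items():
--         if bank in bank_formats:
--             return bank_name
-- ===== SOURCE B (Python) =====
-- _VARIANTS = frozenset({
--     'nbu', 'NB', 'NationalBank', 'nationalbank', 'Nb', 'NBU',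
--     'pb', 'Pb', 'privatbank', 'PrivatBank', 'pB', 'PRIVATBANK', 'PB',
-- })
--
--
-- def validate_input_bank(bank: str) -> str | None:
--     # Validity is one flat membership test; the canonical code is then
--     # COMPUTED from the input itself (its first letter: n/N -> NBU, p/P -> PB),
--     # with no variant-to-code association stored anywhere.
--     if bank not in _VARIANTS:
--         return None
--     return 'NBU' if bank[0] in 'nN' else 'PB'
-- ===== Notes on version B (the rewrite author's own statement) =====
-- stated objective: alternative
-- what changed: A loops over code->variant-set buckets returning the bucket key; B stores no variant-to-code association at all: one flat validity set plus computing the code from the input's first letter (n/N -> NBU, p/P -> PB), correct because the two buckets are split exactly by initial letter.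
import Mathlib
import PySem

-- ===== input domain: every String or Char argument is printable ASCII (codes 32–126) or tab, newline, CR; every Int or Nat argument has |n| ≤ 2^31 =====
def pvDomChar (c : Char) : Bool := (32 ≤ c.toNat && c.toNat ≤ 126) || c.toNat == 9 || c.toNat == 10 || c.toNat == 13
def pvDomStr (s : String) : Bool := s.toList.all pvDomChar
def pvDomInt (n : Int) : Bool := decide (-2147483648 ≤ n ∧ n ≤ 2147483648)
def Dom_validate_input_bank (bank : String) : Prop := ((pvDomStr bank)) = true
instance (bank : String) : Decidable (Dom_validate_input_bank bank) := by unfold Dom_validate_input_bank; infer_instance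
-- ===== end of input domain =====

-- B drops A's code→variant-set buckets: one flat validity set, then the code is computed from the input's first letter.

-- ===== PORT A =====
-- A's literal dict of code → set of accepted spellings
def pvFormatsA : PySem.Dict String (PySem.Set String) := PySem.Dict.mk
  [ ("NBU", PySem.Set.ofList ["nbu", "NB", "NationalBank", "nationalbank", "Nb", "NBU"])
  , ("PB",  PySem.Set.ofList ["pb", "Pb", "privatbank", "PrivatBank", "pB", "PRIVATBANK", "PB"]) ]

-- the 'for … if bank in …: return bank_name' loop, with its implicit 'return None' fall-through
def pvLoopA (bank : String) : List (String × PySem.Set String) → Option String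
  | [] => none
  | (bank_name, bank_formats) :: rest =>
      if PySem.Set.contains bank_formats bank then some bank_name else pvLoopA bank rest

def validate_input_bank (bank : String) : Option String :=
  pvLoopA bank pvFormatsA.items

-- ===== PORT B =====
-- B's flat module-level frozenset of all accepted spellings
def pvVariants : PySem.Set String := PySem.Set.ofList
  [ "nbu", "NB", "NationalBank", "nationalbank", "Nb", "NBU"
  , "pb", "Pb", "privatbank", "PrivatBank", "pB", "PRIVATBANK", "PB" ]

def validate_input_bank_alt (bank : String) : Option String :=
  if ¬ PySem.Set.contains pvVariants bank then none
  else
    -- 'NBU' if bank[0] in 'nN' else 'PB'; bank[0] cannot raise here (every variant is nonempty)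
    match PySem.Str.pyGet? bank 0 with
    | some c => some (if PySem.Chars.isIn [c] ['n', 'N'] then "NBU" else "PB")
    | none => none

-- ===== PRECONDITION & SPEC =====
def Spec_validate_input_bank (bank : String) (out : Option String) : Prop := out = validate_input_bank_alt bank
instance (bank : String) (out : Option String) : Decidable (Spec_validate_input_bank bank out) := by unfold Spec_validate_input_bank; infer_instance

-- ===== CLAIM (what is proved, stated in full; the proofs are below) =====
def Claim_equal_validate_input_bank : Prop := ∀ (bank : String), Dom_validate_input_bank bank → Spec_validate_input_bank bank (validate_input_bank bank)

-- ===== LEMMAS AND PROOFS =====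

theorem validate_input_bank_eq_alt (bank : String) :
    validate_input_bank bank = validate_input_bank_alt bank := by
  by_cases h1 : bank = "nbu"; · subst h1; decide
  by_cases h2 : bank = "NB"; · subst h2; decide
  by_cases h3 : bank = "NationalBank"; · subst h3; decide
  by_cases h4 : bank = "nationalbank"; · subst h4; decide
  by_cases h5 : bank = "Nb"; · subst h5; decide
  by_cases h6 : bank = "NBU"; · subst h6; decide
  by_cases h7 : bank = "pb"; · subst h7; decide
  by_cases h8 : bank = "Pb"; · subst h8; decide
  by_cases h9 : bank = "privatbank"; · subst h9; decide
  by_cases h10 : bank = "PrivatBank"; · subst h10; decide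
  by_cases h11 : bank = "pB"; · subst h11; decide
  by_cases h12 : bank = "PRIVATBANK"; · subst h12; decide
  by_cases h13 : bank = "PB"; · subst h13; decide
  simp [validate_input_bank, validate_input_bank_alt, pvFormatsA, pvVariants, pvLoopA,
        PySem.Set.ofList, PySem.Set.contains, PySem.Dict.items,
        h1, h2, h3, h4, h5, h6, h7, h8, h9, h10, h11, h12, h13]

-- ===== VERDICT (by name: the statement is the Claim_ definition above) =====
theorem validate_input_bank_spec : Claim_equal_validate_input_bank := by
  intro bank _
  exact validate_input_bank_eq_alt bank
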